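-- pv_equiv track=rewrite | github.com/smohapatra1/scripting | python/practice/start_again/2024/04232024/maximizing_the_function.py | maximizingFunction
-- ===== SOURCE A (Python) =====
-- import math
--
-- def maximizingFunction(a, queries):
--     # Write your code here
--     index_coll = []
--
--     count = 0
--     net_index = 0
--
--     for i in range(len(a)):
--         if a[i]:
--             count += 1
--             net_index = (i+1) - net_index
--         index_coll.append((net_index, count, i+1))
--
--     results = []
--     for x, y, k in queries:
--         xlen = y - x + 1
--
--         if k > 0:
--             results.append(max_possible(xlen))
--             continue
--
--         result_index = None
--         if x == 0:
--             result_lookup = index_coll[y]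
--             result_index = result_lookup[0]
--         else:
--             left_lookup = index_coll[x-1]
--             right_lookup = index_coll[y]
--
--             result_calc = subtract_results(left_lookup, right_lookup)
--             result_index = result_calc[0]
--
--         adjust_index = indexCalc(result_index, xlen)
--         results.append(calculatePossibleIndex(xlen, adjust_index))
--
--     return results
--
-- def subtract_results(left_lookup, right_lookup):
--     l_index, l_count, l_len = left_lookup
--     r_index, r_count, r_len = right_lookup
--
--     if l_count & 1 == 0:
--         if r_count & 1 == 0:
--             result_index = r_index - l_index
--         else:
--             result_index = r_index + l_index - l_len
--     else:
--         if r_count & 1 == 0: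
--             result_index = r_index + l_index - l_len
--         else:
--             result_index = r_index - l_index
--
--     result_count = r_count - l_count
--     result_len = r_len - l_len
--
--     return result_index, result_count, result_len
--
-- def indexCalc( x, xlen ):
--     midpoint = math.ceil(xlen / 2)
--
--     if x <= midpoint:
--         return x - 1
--     else:
--         return xlen - x
--
-- def calculatePossibleIndex(n, index):
--
--     is_even = n & 1 == 0
--
--     max_num = n
--     if not is_even:
--         max_num += 1
--
--     max_num = int(max_num / 2)
--
--     i = 1 + index
--
--     retVal = i * (i + (2 * (max_num - i)))
--
--     if is_even:
--         retVal += i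
--
--     return int(retVal)
--
-- def max_possible(length):
--
--     n = int((length + 1) / 2)
--     result = n ** 2
--
--     if length % 2 == 0:
--         result += n
--
--     return result
-- ===== SOURCE B (Python) =====
-- def maximizingFunction(a, queries):
--     results = []
--     for x, y, k in queries:
--         xlen = y - x + 1
--         if k > 0:
--             results.append(max_possible(xlen))
--         else:
--             ni = 0
--             for j, v in enumerate(a[x:y + 1]):
--                 if v:
--                     ni = (j + 1) - ni
--             adjust = indexCalc(ni, xlen)
--             results.append(calculatePossibleIndex(xlen, adjust))
--     return results
--
-- def indexCalc(x, xlen):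
--     midpoint = (xlen + 1) // 2
--     if x <= midpoint:
--         return x - 1
--     return xlen - x
--
-- def calculatePossibleIndex(n, index):
--     i = index + 1
--     m = (n + 1) // 2
--     r = i * (2 * m - i)
--     if n % 2 == 0:
--         r += i
--     return r
--
-- def max_possible(length):
--     n = int((length + 1) / 2)
--     result = n ** 2
--     if length % 2 == 0:
--         result += n
--     return result
-- ===== Notes on version B (the rewrite author's own statement) =====
-- stated objective: simpler
-- what changed: B drops the precomputed index_coll/subtract_results machinery entirely: each k<=0 query scans the slice a[x:y+1] once, folding the relative net index directly, and indexCalc/calculatePossibleIndex are compressed to plain floor-division formulas (max_possible is kept as in A).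
-- outside the precondition, e.g. on maximizingFunction([1, 0, 1], [(0, -1, 0)]): A returns [-2], B returns [0]; on maximizingFunction([1, 1], [(2, 0, 0)]): A returns [0], B returns [0]
import Mathlib
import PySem

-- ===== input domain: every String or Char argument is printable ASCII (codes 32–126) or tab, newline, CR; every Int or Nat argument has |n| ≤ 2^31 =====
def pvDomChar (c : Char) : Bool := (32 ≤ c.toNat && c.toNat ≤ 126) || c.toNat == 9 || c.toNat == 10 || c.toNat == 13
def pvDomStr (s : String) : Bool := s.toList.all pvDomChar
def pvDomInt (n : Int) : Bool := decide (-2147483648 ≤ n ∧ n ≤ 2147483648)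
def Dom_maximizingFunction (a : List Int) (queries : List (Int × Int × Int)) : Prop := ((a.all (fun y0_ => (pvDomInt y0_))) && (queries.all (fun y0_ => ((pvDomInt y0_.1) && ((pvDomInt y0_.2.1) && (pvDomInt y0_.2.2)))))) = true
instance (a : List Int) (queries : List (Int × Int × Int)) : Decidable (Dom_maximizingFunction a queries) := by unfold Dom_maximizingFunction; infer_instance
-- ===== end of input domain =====

-- B replaces A's precomputed prefix table (index_coll) + parity-case subtraction by a direct
-- one-pass fold over the queried slice, and compresses the arithmetic helpers; objective: simpler.

-- ===== PORT A =====

-- int(x/2): Python truncating halving (exact for |x| ≤ 2^53)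
def pvTrunc2 (x : Int) : Int := if 0 ≤ x then x / 2 else -((-x) / 2)

-- math.ceil(xlen/2) is ported as -((-xlen)//2), exact for |xlen| ≤ 2^53
def pvIndexCalcA (x xlen : Int) : Int :=
  let midpoint := -(PySem.Int.floordiv (-xlen) 2)
  if x ≤ midpoint then x - 1 else xlen - x

def pvCalcPossibleA (n index : Int) : Int :=
  let isEven := PySem.Int.band n 1 = 0
  let maxNum : Int := if isEven then n else n + 1
  let maxNum := pvTrunc2 maxNum
  let i := 1 + index
  let retVal := i * (i + 2 * (maxNum - i))
  if isEven then retVal + i else retVal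

def pvMaxPossibleA (length : Int) : Int :=
  let n := pvTrunc2 (length + 1)
  let result := n ^ 2
  if PySem.Int.mod length 2 = 0 then result + n else result

def pvSubtractResults (left right : Int × Int × Int) : Int × Int × Int :=
  let lIndex := left.1;  let lCount := left.2.1;  let lLen := left.2.2
  let rIndex := right.1; let rCount := right.2.1; let rLen := right.2.2
  let resultIndex :=
    if PySem.Int.band lCount 1 = 0 then
      (if PySem.Int.band rCount 1 = 0 then rIndex - lIndex else rIndex + lIndex - lLen)
    else
      (if PySem.Int.band rCount 1 = 0 then rIndex + lIndex - lLen else rIndex - lIndex)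
  (resultIndex, rCount - lCount, rLen - lLen)

-- the first loop: for i in range(len(a)): update (count, net_index), append (net_index, count, i+1)
def pvBuildColl : List Int → Int → Int → Int → List (Int × Int × Int)
  | [], _, _, _ => []
  | v :: t, i, c, ni =>
    if v ≠ 0 then (i + 1 - ni, c + 1, i + 1) :: pvBuildColl t (i + 1) (c + 1) (i + 1 - ni)
    else (ni, c, i + 1) :: pvBuildColl t (i + 1) c ni

-- the query loop; index_coll[…] is pyGet? (Pre_ excludes the IndexError case, the .getD default is never read there)
def pvLoopA (coll : List (Int × Int × Int)) : List (Int × Int × Int) → List Int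
  | [] => []
  | (x, y, k) :: qs =>
    let xlen := y - x + 1
    if k > 0 then pvMaxPossibleA xlen :: pvLoopA coll qs
    else
      let resultIndex :=
        if x = 0 then ((PySem.List.pyGet? coll y).getD (0, 0, 0)).1
        else
          (pvSubtractResults ((PySem.List.pyGet? coll (x - 1)).getD (0, 0, 0))
            ((PySem.List.pyGet? coll y).getD (0, 0, 0))).1
      let adjustIndex := pvIndexCalcA resultIndex xlen
      pvCalcPossibleA xlen adjustIndex :: pvLoopA coll qs

def maximizingFunction (a : List Int) (queries : List (Int × Int × Int)) : List Int :=
  pvLoopA (pvBuildColl a 0 0 0) queries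

-- ===== PORT B =====

-- for j, v in enumerate(seg): if v: ni = (j+1) - ni
def pvSegNi : List Int → Int → Int → Int
  | [], _, ni => ni
  | v :: t, j, ni => pvSegNi t (j + 1) (if v ≠ 0 then j + 1 - ni else ni)

def pvIndexCalcB (x xlen : Int) : Int :=
  let midpoint := PySem.Int.floordiv (xlen + 1) 2
  if x ≤ midpoint then x - 1 else xlen - x

def pvCalcPossibleB (n index : Int) : Int :=
  let i := index + 1
  let m := PySem.Int.floordiv (n + 1) 2
  let r := i * (2 * m - i)
  if PySem.Int.mod n 2 = 0 then r + i else r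

-- B keeps A's max_possible verbatim (int((length+1)/2) is the truncating pvTrunc2)
def pvMaxPossibleB (length : Int) : Int :=
  let n := pvTrunc2 (length + 1)
  let result := n ^ 2
  if PySem.Int.mod length 2 = 0 then result + n else result

def pvLoopB (a : List Int) : List (Int × Int × Int) → List Int
  | [] => []
  | (x, y, k) :: qs =>
    let xlen := y - x + 1
    if k > 0 then pvMaxPossibleB xlen :: pvLoopB a qs
    else
      let ni := pvSegNi (PySem.List.slice a (some x) (some (y + 1))) 0 0
      pvCalcPossibleB xlen (pvIndexCalcB ni xlen) :: pvLoopB a qs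

def maximizingFunction_alt (a : List Int) (queries : List (Int × Int × Int)) : List Int :=
  pvLoopB a queries

-- ===== PRECONDITION & SPEC =====
-- Pre_ admits every query with k > 0 (A never indexes there) and restricts k ≤ 0 queries to
-- well-formed in-bounds ranges 0 ≤ x ≤ y < len(a); it excludes inputs where A raises IndexError,
-- and inputs with negative or inverted indices on which A still returns a value only through
-- Python's accidental negative-index wraparound / stale-table subtraction.
def Pre_maximizingFunction (a : List Int) (queries : List (Int × Int × Int)) : Prop :=
  ∀ q ∈ queries, 0 < q.2.2 ∨ (0 ≤ q.1 ∧ q.1 ≤ q.2.1 ∧ q.2.1 < (a.length : Int))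
instance (a : List Int) (queries : List (Int × Int × Int)) : Decidable (Pre_maximizingFunction a queries) := by unfold Pre_maximizingFunction; infer_instance

def pvWitness_maximizingFunction : List Int × (List (Int × Int × Int)) :=
  ([1, 0, 1, 1], [(0, 3, 0), (1, 2, 0), (2, 3, 1), (1, 1, 0)])

def Spec_maximizingFunction (a : List Int) (queries : List (Int × Int × Int)) (out : List Int) : Prop := out = maximizingFunction_alt a queries
instance (a : List Int) (queries : List (Int × Int × Int)) (out : List Int) : Decidable (Spec_maximizingFunction a queries out) := by unfold Spec_maximizingFunction; infer_instance

-- ===== CLAIM (what is proved, stated in full; the proofs are below) =====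
def Claim_equal_maximizingFunction : Prop := ∀ (a : List Int) (queries : List (Int × Int × Int)), Dom_maximizingFunction a queries → Pre_maximizingFunction a queries → Spec_maximizingFunction a queries (maximizingFunction a queries)

-- ===== LEMMAS AND PROOFS =====

-- count of truthy elements
def pvCnt (l : List Int) : Nat := l.countP (fun v => decide (v ≠ 0))

lemma pvCnt_cons (v : Int) (t : List Int) :
    pvCnt (v :: t) = pvCnt t + (if v ≠ 0 then 1 else 0) := by
  simp [pvCnt, List.countP_cons]

lemma pvCnt_append (u v : List Int) : pvCnt (u ++ v) = pvCnt u + pvCnt v := by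
  simp [pvCnt, List.countP_append]

-- the m-th table entry is the state of the scan after the first m+1 elements
lemma pvBuildColl_get (a : List Int) : ∀ (m : Nat) (i c ni : Int), m < a.length →
    (pvBuildColl a i c ni)[m]? =
      some (pvSegNi (a.take (m + 1)) i ni, c + (pvCnt (a.take (m + 1)) : Int), i + m + 1) := by
  induction a with
  | nil => intro m i c ni h; simp at h
  | cons v t ih =>
    intro m i c ni h
    match m with
    | 0 =>
      by_cases hv : v ≠ 0 <;>
        simp [pvBuildColl, pvSegNi, pvCnt_cons, pvCnt, hv] <;> omega
    | Nat.succ m =>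
      have hm : m < t.length := by simpa using h
      by_cases hv : v ≠ 0 <;>
        simp [pvBuildColl, pvSegNi, hv, List.take_succ_cons, ih m _ _ _ hm,
              pvCnt_cons] <;> push_cast <;> omega

lemma pvSegNi_append (u v : List Int) : ∀ j ni,
    pvSegNi (u ++ v) j ni = pvSegNi v (j + u.length) (pvSegNi u j ni) := by
  induction u with
  | nil => intro j ni; simp [pvSegNi]
  | cons h t ih =>
    intro j ni
    simp [pvSegNi, ih]
    ring_nf

-- the scan result is affine in the start position and the initial accumulator
lemma pvSegNi_affine (l : List Int) : ∀ j ni,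
    pvSegNi l j ni = pvSegNi l 0 0 + j * (if pvCnt l % 2 = 1 then 1 else 0)
      + (if pvCnt l % 2 = 1 then -1 else 1) * ni := by
  induction l with
  | nil => intro j ni; simp [pvSegNi, pvCnt]
  | cons v t ih =>
    intro j ni
    by_cases hv : v ≠ 0
    · have key : pvSegNi (v :: t) j ni = pvSegNi t (j + 1) (j + 1 - ni) := by
        simp [pvSegNi, hv]
      have key0 : pvSegNi (v :: t) 0 0 = pvSegNi t 1 1 := by
        norm_num [pvSegNi, hv]
      have hc : pvCnt (v :: t) = pvCnt t + 1 := by simp [pvCnt_cons, hv]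
      rw [key, key0, hc, ih (j + 1) (j + 1 - ni), ih 1 1]
      rcases Nat.mod_two_eq_zero_or_one (pvCnt t) with hp | hp <;>
        simp [Nat.add_mod, hp] <;> ring_nf <;> omega
    · have key : pvSegNi (v :: t) j ni = pvSegNi t (j + 1) ni := by
        simp [pvSegNi, hv]
      have key0 : pvSegNi (v :: t) 0 0 = pvSegNi t 1 0 := by
        norm_num [pvSegNi, hv]
      have hc : pvCnt (v :: t) = pvCnt t := by simp [pvCnt_cons, hv]
      rw [key, key0, hc, ih (j + 1) ni, ih 1 0]
      rcases Nat.mod_two_eq_zero_or_one (pvCnt t) with hp | hp <;> simp [hp] <;> ring_nf <;> omega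

-- midpoints agree: math.ceil(xlen/2) = (xlen+1)//2
lemma pvMid_eq (xlen : Int) :
    -(PySem.Int.floordiv (-xlen) 2) = PySem.Int.floordiv (xlen + 1) 2 := by
  rw [PySem.Int.floordiv_eq_ediv_of_pos (by norm_num), PySem.Int.floordiv_eq_ediv_of_pos (by norm_num)]
  omega

lemma pvIndexCalc_eq (r xlen : Int) : pvIndexCalcA r xlen = pvIndexCalcB r xlen := by
  unfold pvIndexCalcA pvIndexCalcB
  rw [pvMid_eq]

lemma pvCalcPossible_eq (n idx : Int) (h : 1 ≤ n) :
    pvCalcPossibleA n idx = pvCalcPossibleB n idx := by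
  unfold pvCalcPossibleA pvCalcPossibleB pvTrunc2
  rw [PySem.Int.band_one, PySem.Int.mod_eq_emod_of_pos (by norm_num),
      PySem.Int.floordiv_eq_ediv_of_pos (by norm_num)]
  by_cases hp : n % 2 = 0
  · have h0 : (0:Int) ≤ n := by omega
    have hm : n / 2 = (n + 1) / 2 := by omega
    simp [hp, h0, ← hm]; ring
  · have h0 : (0:Int) ≤ n + 1 := by omega
    simp [hp, h0]; ring

lemma pvMaxPossible_eq (L : Int) : pvMaxPossibleA L = pvMaxPossibleB L := rfl

-- the heart: A's table lookup / parity subtraction equals B's direct scan of the slice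
lemma pvIndex_eq (a : List Int) (x y : Int) (hx : 0 ≤ x) (hxy : x ≤ y) (hy : y < (a.length : Int)) :
    (if x = 0 then ((PySem.List.pyGet? (pvBuildColl a 0 0 0) y).getD (0, 0, 0)).1
     else (pvSubtractResults ((PySem.List.pyGet? (pvBuildColl a 0 0 0) (x - 1)).getD (0, 0, 0))
            ((PySem.List.pyGet? (pvBuildColl a 0 0 0) y).getD (0, 0, 0))).1)
    = pvSegNi (PySem.List.slice a (some x) (some (y + 1))) 0 0 := by
  obtain ⟨xn, rfl⟩ : ∃ xn : Nat, x = (xn : Int) := ⟨x.toNat, (Int.toNat_of_nonneg hx).symm⟩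
  obtain ⟨yn, rfl⟩ : ∃ yn : Nat, y = (yn : Int) := ⟨y.toNat, (Int.toNat_of_nonneg (by omega)).symm⟩
  have hyn : yn < a.length := by exact_mod_cast hy
  have hxyn : xn ≤ yn := by exact_mod_cast hxy
  have hslice : PySem.List.slice a (some (xn : Int)) (some ((yn : Int) + 1))
      = (a.drop xn).take (yn + 1 - xn) := by
    have : ((yn : Int) + 1) = ((yn + 1 : Nat) : Int) := by push_cast; ring
    rw [this, PySem.List.slice_natCast]
  have hTsplit : a.take (yn + 1) = a.take xn ++ (a.drop xn).take (yn + 1 - xn) := by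
    conv_lhs => rw [show yn + 1 = xn + (yn + 1 - xn) from by omega]
    rw [List.take_add]
  have hgy := pvBuildColl_get a yn 0 0 0 hyn
  by_cases hx0 : (xn : Int) = 0
  · have hxn0 : xn = 0 := by exact_mod_cast hx0
    rw [if_pos hx0, PySem.List.pyGet?_natCast, hgy, hslice]
    subst hxn0
    simp only [Option.getD_some, Nat.sub_zero, List.drop_zero]
  · have hxn1 : 1 ≤ xn := by omega
    have hgx := pvBuildColl_get a (xn - 1) 0 0 0 (by omega)
    rw [if_neg hx0, hslice]
    have hx1 : (xn : Int) - 1 = ((xn - 1 : Nat) : Int) := by omega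
    rw [hx1, PySem.List.pyGet?_natCast, PySem.List.pyGet?_natCast, hgx, hgy]
    have hsucc : xn - 1 + 1 = xn := by omega
    rw [hsucc]
    simp only [Option.getD_some]
    set S := (a.drop xn).take (yn + 1 - xn) with hS
    have hNT : pvSegNi (a.take (yn + 1)) 0 0
        = pvSegNi S (0 + (a.take xn).length) (pvSegNi (a.take xn) 0 0) := by
      rw [hTsplit, pvSegNi_append]
    have hlenU : (a.take xn).length = xn := by
      simp [List.length_take]; omega
    have hcT : pvCnt (a.take (yn + 1)) = pvCnt (a.take xn) + pvCnt S := by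
      rw [hTsplit, pvCnt_append]
    rw [hlenU, zero_add, pvSegNi_affine S (xn : Int) (pvSegNi (a.take xn) 0 0)] at hNT
    unfold pvSubtractResults
    dsimp only
    simp only [PySem.Int.band_one,
      PySem.Int.mod_eq_emod_of_pos (show (0:Int) < 2 by norm_num), hcT]
    push_cast at hNT ⊢
    split_ifs at hNT ⊢ <;> omega

-- per-query equality chained over the query list
lemma pvLoop_eq (a : List Int) (qs : List (Int × Int × Int))
    (h : ∀ q ∈ qs, 0 < q.2.2 ∨ (0 ≤ q.1 ∧ q.1 ≤ q.2.1 ∧ q.2.1 < (a.length : Int))) :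
    pvLoopA (pvBuildColl a 0 0 0) qs = pvLoopB a qs := by
  induction qs with
  | nil => rfl
  | cons q qs ih =>
    obtain ⟨x, y, k⟩ := q
    have hq := h (x, y, k) (by simp)
    have ht := fun q hq0 => h q (List.mem_cons_of_mem _ hq0)
    by_cases hk : k > 0
    · simp only [pvLoopA, pvLoopB, if_pos hk, ih ht]
      rw [pvMaxPossible_eq (y - x + 1)]
    · obtain ⟨h1, h2, h3⟩ : 0 ≤ x ∧ x ≤ y ∧ y < (a.length : Int) := by
        rcases hq with hk' | hb
        · exact absurd (by simpa using hk') hk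
        · simpa using hb
      simp only [pvLoopA, pvLoopB, if_neg hk, ih ht]
      rw [pvIndex_eq a x y h1 h2 h3, pvIndexCalc_eq, pvCalcPossible_eq _ _ (by omega)]

-- ===== VERDICT (by name: the statement is the Claim_ definition above) =====
theorem maximizingFunction_spec : Claim_equal_maximizingFunction := by
  intro a queries _ hpre
  unfold Spec_maximizingFunction maximizingFunction maximizingFunction_alt
  exact pvLoop_eq a queries hpre
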